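-- pv_equiv track=rewrite | github.com/koskin17/MyEducation | Different/CodeWars/Numbers Which Sum of Powers of Its Digits Is The Same Number.py | eq_sum_powdig
-- ===== SOURCE A (Python) =====
-- def eq_sum_powdig(hmax, exp):
--     lst = []
--     tmp = 0
--     for number in range(hmax + 1):
--         for i in range(len(str(number))):
--             tmp += int(str(number)[i]) ** exp
--
--         if tmp == number and tmp not in [0, 1]:
--             lst.append(number)
--
--         tmp = 0
--
--     return lst
-- ===== SOURCE B (Python) =====
-- def eq_sum_powdig(hmax, exp):
--     # Numbers >= 2 equal to the sum of their digits each raised to exp.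
--     # Any solution n satisfies n <= len(str(n)) * 9**exp <= len(str(hmax)) * 9**exp,
--     # so the scan can stop at that cap instead of running all the way to hmax; the ten
--     # possible digit powers are computed once instead of once per digit per number.
--     res = []
--     if hmax >= 2 and exp >= 0:
--         d = len(str(hmax))
--         p = 1
--         e = exp
--         while e > 0 and d * p < hmax:   # build 9**exp, stopping once the cap cannot bind
--             p *= 9
--             e -= 1
--         cap = min(hmax, d * p)
--         pows = [k ** exp for k in range(10)]
--         for n in range(2, cap + 1):
--             if sum(pows[int(c)] for c in str(n)) == n:
--                 res.append(n)
--     return res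
-- ===== Notes on version B (the rewrite author's own statement) =====
-- stated objective: faster
-- what changed: Instead of scanning all of range(hmax+1), B scans only up to the cap min(hmax, len(str(hmax)) * 9**exp), beyond which no number can equal its digit-power sum (a d-digit number's sum is at most d*9**exp), starting at 2 so the 'not in [0,1]' test disappears; 9**exp is built incrementally and stops early once the cap cannot bind.
import Mathlib
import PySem

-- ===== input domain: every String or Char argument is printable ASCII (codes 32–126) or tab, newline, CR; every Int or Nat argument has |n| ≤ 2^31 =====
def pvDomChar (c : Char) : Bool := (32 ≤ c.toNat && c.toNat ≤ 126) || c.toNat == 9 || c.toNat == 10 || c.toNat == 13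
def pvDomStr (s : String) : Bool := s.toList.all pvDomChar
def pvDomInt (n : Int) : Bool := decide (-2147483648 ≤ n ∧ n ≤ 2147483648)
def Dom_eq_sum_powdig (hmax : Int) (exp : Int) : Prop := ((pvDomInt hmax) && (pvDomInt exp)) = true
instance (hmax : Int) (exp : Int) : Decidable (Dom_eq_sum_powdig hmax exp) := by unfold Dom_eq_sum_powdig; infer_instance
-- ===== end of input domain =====

-- B caps the scan at min(hmax, len(str(hmax)) * 9**exp) — no solution can exceed that bound —
-- instead of A's full scan of range(hmax + 1); return values are proved equal on Pre_.


-- ===== PORT A =====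
def eq_sum_powdig (hmax : Int) (exp : Int) : List Int :=
  (PySem.List.pyRange 0 (hmax + 1) 1).foldl (fun lst number =>
    let s := PySem.Int.toChars number                  -- str(number)
    let tmp : Int := (PySem.List.pyRange 0 ((s.length : Int)) 1).foldl
      (fun tmp i => tmp + ((PySem.Int.ofChars? [PySem.List.pyGetD s i ' ']).getD 0) ^ exp.toNat) 0
      -- int(str(number)[i]) ** exp; exp.toNat is exact on Pre_ (exp ≥ 0, or the range is empty)
    if tmp = number ∧ ¬(tmp = 0 ∨ tmp = 1) then lst ++ [number] else lst) []

-- ===== PORT B =====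
-- the Python while loop 'while e > 0 and d * p < hmax: p *= 9; e -= 1' (e counts down from exp)
def pvBPow (d : Int) (hmax : Int) : Nat → Int → Int
  | 0, p => p
  | e + 1, p => if d * p < hmax then pvBPow d hmax e (p * 9) else p

def eq_sum_powdig_alt (hmax : Int) (exp : Int) : List Int :=
  if 2 ≤ hmax ∧ 0 ≤ exp then
    let d : Int := ((PySem.Int.toChars hmax).length : Int)   -- len(str(hmax))
    let p := pvBPow d hmax exp.toNat 1
    let cap := min hmax (d * p)
    let pows := (PySem.List.pyRange 0 10 1).map (fun k => k ^ exp.toNat)   -- [k ** exp for k in range(10)]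
    (PySem.List.pyRange 2 (cap + 1) 1).foldl (fun res n =>
      if ((PySem.Int.toChars n).map
            (fun c => PySem.List.pyGetD pows ((PySem.Int.ofChars? [c]).getD 0) 0)).sum = n
      then res ++ [n] else res) []
  else []

-- ===== PRECONDITION & SPEC =====
-- Pre_ excludes exactly the inputs where A raises: for exp < 0 and hmax ≥ 0 the very first
-- iteration (number = 0) computes 0 ** exp and raises ZeroDivisionError.
def Pre_eq_sum_powdig (hmax : Int) (exp : Int) : Prop := 0 ≤ exp ∨ hmax < 0
instance (hmax : Int) (exp : Int) : Decidable (Pre_eq_sum_powdig hmax exp) := by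
  unfold Pre_eq_sum_powdig; infer_instance
def pvWitness_eq_sum_powdig : Int × Int := (20, 2)

def Spec_eq_sum_powdig (hmax : Int) (exp : Int) (out : List Int) : Prop := out = eq_sum_powdig_alt hmax exp
instance (hmax : Int) (exp : Int) (out : List Int) : Decidable (Spec_eq_sum_powdig hmax exp out) := by unfold Spec_eq_sum_powdig; infer_instance

-- ===== CLAIM (what is proved, stated in full; the proofs are below) =====
def Claim_equal_eq_sum_powdig : Prop := ∀ (hmax : Int) (exp : Int), Dom_eq_sum_powdig hmax exp → Pre_eq_sum_powdig hmax exp → Spec_eq_sum_powdig hmax exp (eq_sum_powdig hmax exp)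

-- ===== LEMMAS AND PROOFS =====

-- the digit-power sum both programs compute for one number
def pvSumDig (E : Nat) (m : Int) : Int :=
  ((PySem.Int.toChars m).map (fun c => ((PySem.Int.ofChars? [c]).getD 0) ^ E)).sum

lemma pvToDigitsCore_eq (f : Nat) : ∀ (n : Nat) (acc : List Char), n < f →
    Nat.toDigitsCore 10 f n acc =
      (if n = 0 then ['0'] else ((Nat.digits 10 n).map Nat.digitChar).reverse) ++ acc := by
  induction f with
  | zero => intro n acc h; omega
  | succ f ih =>
    intro n acc h
    rw [Nat.toDigitsCore]
    by_cases h0 : n / 10 = 0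
    · simp only [h0, if_true]
      by_cases hn : n = 0
      · simp [hn]; decide
      · have hlt : n < 10 := by omega
        rw [if_neg hn, Nat.digits_def' (by norm_num : 1 < 10) (by omega), h0,
          Nat.digits_zero, Nat.mod_eq_of_lt hlt]
        simp
    · rw [if_neg h0]
      have hn : n ≠ 0 := by intro hn; apply h0; simp [hn]
      rw [ih (n / 10) _ (by omega), if_neg h0, if_neg hn,
        show Nat.digits 10 n = n % 10 :: Nat.digits 10 (n / 10) from
          Nat.digits_def' (by norm_num : 1 < 10) (by omega)]
      simp

lemma pvToChars_eq (n : Nat) :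
    PySem.Int.toChars (n : Int) =
      (if n = 0 then ['0'] else ((Nat.digits 10 n).map Nat.digitChar).reverse) := by
  rw [PySem.Int.toChars]
  rw [if_neg (by omega : ¬ (n : Int) < 0)]
  rw [Int.toNat_natCast, Nat.toDigits, pvToDigitsCore_eq (n+1) n [] (by omega)]
  simp

lemma pvOfChars_digitChar (k : Nat) (hk : k < 10) :
    (PySem.Int.ofChars? [Nat.digitChar k]).getD 0 = (k : Int) := by
  interval_cases k <;> decide

lemma pvLen_eq (n : Nat) : (PySem.Int.toChars (n : Int)).length = Nat.log 10 n + 1 := by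
  rw [pvToChars_eq]
  by_cases hn : n = 0
  · simp [hn]
  · rw [if_neg hn]
    simp [Nat.length_digits (b := 10) (n := n) (by norm_num) hn]

lemma pvLen_mono (n m : Nat) (h : n ≤ m) :
    (PySem.Int.toChars (n : Int)).length ≤ (PySem.Int.toChars (m : Int)).length := by
  rw [pvLen_eq, pvLen_eq]
  exact Nat.add_le_add_right (Nat.log_mono_right h) 1

-- every character of str(n) for n ≥ 0 carries a digit value 0 ≤ k < 10
lemma pvChar_val (n : Nat) (c : Char) (hc : c ∈ PySem.Int.toChars (n : Int)) :
    ∃ k : Nat, k < 10 ∧ (PySem.Int.ofChars? [c]).getD 0 = (k : Int) := by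
  rw [pvToChars_eq] at hc
  by_cases hn : n = 0
  · rw [if_pos hn] at hc
    simp at hc
    subst hc
    exact ⟨0, by norm_num, by decide⟩
  · rw [if_neg hn, List.mem_reverse, List.mem_map] at hc
    rcases hc with ⟨k, hk, rfl⟩
    have hk10 : k < 10 := Nat.digits_lt_base (by norm_num) hk
    exact ⟨k, hk10, pvOfChars_digitChar k hk10⟩

-- B's table lookup pows[int(c)] computes the same digit power
lemma pvTab_eq (E : Nat) (n : Int) (hn : 0 ≤ n) :
    ((PySem.Int.toChars n).map
      (fun c => PySem.List.pyGetD ((PySem.List.pyRange 0 10 1).map (fun k => k ^ E))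
        ((PySem.Int.ofChars? [c]).getD 0) 0)).sum = pvSumDig E n := by
  unfold pvSumDig
  congr 1
  apply List.map_congr_left
  intro c hc
  rw [← Int.toNat_of_nonneg hn] at hc
  rcases pvChar_val n.toNat c hc with ⟨k, hk, hv⟩
  rw [hv, PySem.List.pyGetD_map_pyRange_of_nonneg (fun k => k ^ E) 10 (k : Int) 0
    (by positivity) (by exact_mod_cast hk)]

lemma pvSumDig_le (E : Nat) (n : Nat) :
    pvSumDig E (n : Int) ≤ ((PySem.Int.toChars (n : Int)).length : Int) * 9 ^ E := by
  unfold pvSumDig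
  have hb : ∀ x ∈ (PySem.Int.toChars (n : Int)).map
      (fun c => ((PySem.Int.ofChars? [c]).getD 0) ^ E), x ≤ (9 : Int) ^ E := by
    intro x hx
    rcases List.mem_map.mp hx with ⟨c, hc, rfl⟩
    rcases pvChar_val n c (by simpa using hc) with ⟨k, hk, hv⟩
    rw [hv]
    gcongr
    exact_mod_cast Nat.le_of_lt_succ hk
  have := List.sum_le_card_nsmul _ _ hb
  simpa [nsmul_eq_mul] using this
lemma pvBPow_spec (d hmax : Int) (e : Nat) : ∀ p : Int,
    pvBPow d hmax e p = p * 9 ^ e ∨ hmax ≤ d * pvBPow d hmax e p := by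
  induction e with
  | zero => intro p; left; simp [pvBPow]
  | succ e ih =>
    intro p
    by_cases hc : d * p < hmax
    · rcases ih (p * 9) with h | h
      · left; simp [pvBPow, hc, h]; ring
      · right; simpa [pvBPow, hc] using h
    · right; simp [pvBPow, hc]; omega

lemma pvBPow_pos (d hmax : Int) (e : Nat) : ∀ p : Int, 1 ≤ p → 1 ≤ pvBPow d hmax e p := by
  induction e with
  | zero => intro p hp; simpa [pvBPow] using hp
  | succ e ih =>
    intro p hp
    by_cases hc : d * p < hmax
    · simpa [pvBPow, hc] using ih (p * 9) (by omega)
    · simpa [pvBPow, hc] using hp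

lemma pvNoSolution (hmax exp n : Int) (h2 : 2 ≤ hmax) (_he : 0 ≤ exp)
    (hcap : min hmax ((((PySem.Int.toChars hmax).length : Int)) *
      pvBPow ((PySem.Int.toChars hmax).length : Int) hmax exp.toNat 1) < n)
    (hn : n ≤ hmax) : pvSumDig exp.toNat n ≠ n := by
  set L : Int := ((PySem.Int.toChars hmax).length : Int) with hL
  rcases pvBPow_spec L hmax exp.toNat 1 with hp | hp
  · -- p = 9^E
    rw [hp, one_mul] at hcap
    have hlt : L * 9 ^ exp.toNat < n := by
      rcases le_or_gt (L * 9 ^ exp.toNat) hmax with h | h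
      · simpa [min_eq_right h] using hcap
      · simp [min_eq_left h.le] at hcap; omega
    intro hEq
    have hd0 : (0:Int) ≤ L * 9 ^ exp.toNat := by positivity
    have hn0 : 0 ≤ n := by omega
    have hcast : ((n.toNat : Int)) = n := Int.toNat_of_nonneg hn0
    have hb : pvSumDig exp.toNat n ≤ ((PySem.Int.toChars n).length : Int) * 9 ^ exp.toNat := by
      rw [← hcast]; exact pvSumDig_le exp.toNat n.toNat
    have hmono : ((PySem.Int.toChars n).length : Int) ≤ L := by
      rw [hL, ← hcast, ← Int.toNat_of_nonneg (by omega : (0:Int) ≤ hmax)]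
      exact_mod_cast pvLen_mono n.toNat hmax.toNat (by omega)
    have h9 : (0:Int) ≤ 9 ^ exp.toNat := by positivity
    nlinarith
  · -- early exit: cap = hmax
    rw [min_eq_left hp] at hcap
    intro _
    omega
lemma pvTmp_eq (exp number : Int) :
    (PySem.List.pyRange 0 (((PySem.Int.toChars number).length : Int)) 1).foldl
      (fun tmp i => tmp + ((PySem.Int.ofChars? [PySem.List.pyGetD (PySem.Int.toChars number) i ' ']).getD 0) ^ exp.toNat) 0
    = pvSumDig exp.toNat number := by
  rw [PySem.List.foldl_pyRange_zero_pyGetD' (PySem.Int.toChars number) ' '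
      (fun tmp c => tmp + ((PySem.Int.ofChars? [c]).getD 0) ^ exp.toNat) 0,
    PySem.List.foldl_add]
  simp [pvSumDig]

lemma pvA_filter (hmax exp : Int) :
    eq_sum_powdig hmax exp = (PySem.List.pyRange 0 (hmax + 1) 1).filter
      (fun x => decide (pvSumDig exp.toNat x = x ∧ ¬(pvSumDig exp.toNat x = 0 ∨ pvSumDig exp.toNat x = 1))) := by
  unfold eq_sum_powdig
  simp only [pvTmp_eq]
  rw [PySem.List.foldl_append_ite_eq_filter
    (fun x => pvSumDig exp.toNat x = x ∧ ¬(pvSumDig exp.toNat x = 0 ∨ pvSumDig exp.toNat x = 1))]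
  simp

lemma pvB_filter (hmax exp : Int) (h2 : 2 ≤ hmax) (he : 0 ≤ exp) :
    eq_sum_powdig_alt hmax exp =
      (PySem.List.pyRange 2
        (min hmax ((((PySem.Int.toChars hmax).length : Int)) *
          pvBPow ((PySem.Int.toChars hmax).length : Int) hmax exp.toNat 1) + 1) 1).filter
        (fun x => decide (pvSumDig exp.toNat x = x)) := by
  unfold eq_sum_powdig_alt
  rw [if_pos ⟨h2, he⟩]
  rw [PySem.List.foldl_append_ite_eq_filter (fun x =>
    ((PySem.Int.toChars x).map
      (fun c => PySem.List.pyGetD ((PySem.List.pyRange 0 10 1).map (fun k => k ^ exp.toNat))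
        ((PySem.Int.ofChars? [c]).getD 0) 0)).sum = x)]
  rw [List.nil_append]
  apply List.filter_congr
  intro x hx
  have hm := PySem.List.mem_pyRange_one.mp hx
  rw [pvTab_eq exp.toNat x (by omega)]

lemma pvPA_false (E : Nat) (x : Int) (hx : x = 0 ∨ x = 1) :
    ¬(pvSumDig E x = x ∧ ¬(pvSumDig E x = 0 ∨ pvSumDig E x = 1)) := by
  rcases hx with rfl | rfl <;> tauto

lemma pvMain (hmax exp : Int) (hpre : 0 ≤ exp ∨ hmax < 0) :
    eq_sum_powdig hmax exp = eq_sum_powdig_alt hmax exp := by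
  by_cases h2 : 2 ≤ hmax
  · have he : 0 ≤ exp := by rcases hpre with h | h <;> omega
    rw [pvA_filter, pvB_filter hmax exp h2 he]
    set L : Int := ((PySem.Int.toChars hmax).length : Int) with hL
    set P : Int := pvBPow L hmax exp.toNat 1 with hP
    set cap : Int := min hmax (L * P) with hcapdef
    have hP1 : 1 ≤ P := pvBPow_pos L hmax exp.toNat 1 le_rfl
    have hL1 : 1 ≤ L := by
      rw [hL, ← Int.toNat_of_nonneg (by omega : (0:Int) ≤ hmax), pvLen_eq]
      exact_mod_cast Nat.le_add_left 1 _
    have hcap1 : 1 ≤ cap := le_min (by omega) (by nlinarith)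
    have hcaphmax : cap ≤ hmax := min_le_left _ _
    rw [PySem.List.pyRange_one_append 0 2 (hmax + 1) (by omega) (by omega),
      PySem.List.pyRange_one_append 2 (cap + 1) (hmax + 1) (by omega) (by omega),
      List.filter_append, List.filter_append]
    have h01 : PySem.List.pyRange 0 2 1 = [0, 1] := by
      rw [PySem.List.pyRange_one_cons (by omega), PySem.List.pyRange_one_cons (by omega),
        PySem.List.pyRange_one_eq_nil (by omega)]
      norm_num
    have hfirst : (PySem.List.pyRange 0 2 1).filter
        (fun x => decide (pvSumDig exp.toNat x = x ∧ ¬(pvSumDig exp.toNat x = 0 ∨ pvSumDig exp.toNat x = 1))) = [] := by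
      have hd0 := decide_eq_false (pvPA_false exp.toNat 0 (Or.inl rfl))
      have hd1 := decide_eq_false (pvPA_false exp.toNat 1 (Or.inr rfl))
      rw [h01]
      simp only [List.filter, hd0, hd1]
    have hlast : (PySem.List.pyRange (cap + 1) (hmax + 1) 1).filter
        (fun x => decide (pvSumDig exp.toNat x = x ∧ ¬(pvSumDig exp.toNat x = 0 ∨ pvSumDig exp.toNat x = 1))) = [] := by
      apply List.filter_eq_nil_iff.mpr
      intro x hx
      have hm := PySem.List.mem_pyRange_one.mp hx
      simp only [decide_eq_true_eq, not_and]
      intro h1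
      exact absurd h1 (pvNoSolution hmax exp x h2 he (by rw [← hL, ← hP, ← hcapdef]; omega) (by omega))
    have hmid : (PySem.List.pyRange 2 (cap + 1) 1).filter
        (fun x => decide (pvSumDig exp.toNat x = x ∧ ¬(pvSumDig exp.toNat x = 0 ∨ pvSumDig exp.toNat x = 1)))
        = (PySem.List.pyRange 2 (cap + 1) 1).filter (fun x => decide (pvSumDig exp.toNat x = x)) := by
      apply List.filter_congr
      intro x hx
      have hm := PySem.List.mem_pyRange_one.mp hx
      have hx2 : 2 ≤ x := hm.1
      simp only [decide_eq_decide]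
      constructor
      · exact fun h => h.1
      · intro h
        exact ⟨h, by omega⟩
    rw [hfirst, hlast, hmid]
    simp
  · have hBnil : eq_sum_powdig_alt hmax exp = [] := by
      unfold eq_sum_powdig_alt
      rw [if_neg (by omega)]
    rw [pvA_filter, hBnil]
    rcases lt_or_ge hmax 0 with h | h
    · rw [PySem.List.pyRange_one_eq_nil (by omega)]
      simp
    · have : hmax = 0 ∨ hmax = 1 := by omega
      have hrange : PySem.List.pyRange 0 (hmax + 1) 1 = [0] ∨ PySem.List.pyRange 0 (hmax + 1) 1 = [0, 1] := by
        rcases this with rfl | rfl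
        · left
          rw [PySem.List.pyRange_one_cons (by omega), PySem.List.pyRange_one_eq_nil (by omega)]
        · right
          rw [PySem.List.pyRange_one_cons (by omega), PySem.List.pyRange_one_cons (by omega),
            PySem.List.pyRange_one_eq_nil (by omega)]
          norm_num
      have hd0 := decide_eq_false (pvPA_false exp.toNat 0 (Or.inl rfl))
      have hd1 := decide_eq_false (pvPA_false exp.toNat 1 (Or.inr rfl))
      rcases hrange with h | h <;>
        · rw [h]
          simp only [List.filter, hd0, hd1]

-- ===== VERDICT (by name: the statements are the Claim_ definitions above) =====
theorem eq_sum_powdig_spec : Claim_equal_eq_sum_powdig := by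
  intro hmax exp _ hpre
  unfold Spec_eq_sum_powdig
  exact pvMain hmax exp hpre
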